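-- pv_equiv track=rewrite | github.com/krzychsol/ASD | Greedy/covid.py | covid
-- ===== SOURCE A (Python) =====
-- def covid(T,k):
--     last = -1  # zeby pierwsze spr bylo dla miasta o indeksie 0
--     counter = 0
--     notProtected = last + k
--     while last < len(T) - k:  # jesli maszyna jest na ktoryms z ostatnich k miejsc to ochroni reszte miast po niej, wiec nie musimy dalej sprawdzac
--         if notProtected >= len(T):  # jesli ostatnie niechronione jest za tablica, to zaczynam od ostatniego
--             notProtected = len(T) - 1
--         while T[notProtected] != 1 and notProtected >= last + 1:
--             notProtected -= 1
--         if notProtected == last:  # tzn ze nie bylo maszyny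
--             return -1
--         else:
--             # na miejscu not protected stawiamy maszyne
--             last = notProtected
--             notProtected += 2 * k - 1  # kolejne k-1 chronimy, a maksymalnie niechronione moze byc jeszcze o kolejne k dalej(tam najdalej maszyna)
--             counter += 1
--
--     return counter
-- ===== SOURCE B (Python) =====
-- def covid(T, k):
--     # One forward pass: precompute the sorted positions of 1s and sweep a
--     # pointer j through them; each step picks the rightmost machine position
--     # <= uncovered + k - 1 (a machine at p protects p-k+1 .. p+k-1).
--     # prev is the last machine placed (-1 = virtual machine before the road);
--     # the loop runs while some city beyond prev's range exists.
--     n = len(T)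
--     ones = [i for i, x in enumerate(T) if x == 1]
--     count = 0
--     prev = -1
--     uncovered = 0
--     j = 0
--     while prev + k < n:
--         while j < len(ones) and ones[j] <= uncovered + k - 1:
--             j += 1
--         if j == 0 or ones[j - 1] <= prev:
--             return -1
--         prev = ones[j - 1]
--         uncovered = prev + k
--         count += 1
--     return count
-- ===== Notes on version B (the rewrite author's own statement) =====
-- stated objective: alternative
-- what changed: Replaces A's repeated backward scans of T (rescanning overlapping candidate windows) with a precomputed list of the 1-positions swept once by a forward pointer, so each greedy step picks the rightmost usable position from that list.
import Mathlib
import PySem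

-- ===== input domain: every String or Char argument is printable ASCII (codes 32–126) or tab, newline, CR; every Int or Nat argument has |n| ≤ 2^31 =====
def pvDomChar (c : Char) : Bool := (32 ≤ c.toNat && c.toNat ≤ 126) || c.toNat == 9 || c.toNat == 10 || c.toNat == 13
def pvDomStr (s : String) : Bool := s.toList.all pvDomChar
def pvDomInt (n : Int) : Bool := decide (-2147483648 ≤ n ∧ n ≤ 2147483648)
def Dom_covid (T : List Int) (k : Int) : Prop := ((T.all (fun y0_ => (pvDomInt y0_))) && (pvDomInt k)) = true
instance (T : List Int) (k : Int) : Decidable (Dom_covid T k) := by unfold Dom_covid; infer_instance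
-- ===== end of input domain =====

-- B replaces A's repeated backward scans of T with one precomputed list of
-- 1-positions swept by a single forward pointer (one pass overall).

-- ===== PORT A =====
-- the inner `while T[notProtected] != 1 and notProtected >= last + 1` loop;
-- `none` from pyGet? is Python's IndexError (those inputs are outside Pre_covid)
def covidInner (T : List Int) (last np : Int) (fuel : Nat) : Int :=
  match fuel with
  | 0 => np
  | fuel + 1 =>
    match PySem.List.pyGet? T np with
    | none => np
    | some v => if v ≠ 1 ∧ last + 1 ≤ np then covidInner T last (np - 1) fuel else np

-- the outer `while last < len(T) - k` loop; fuel T.length + 1 never runs out under Pre_covid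
def covidLoop (T : List Int) (k last notP counter : Int) (fuel : Nat) : Int :=
  match fuel with
  | 0 => counter
  | fuel + 1 =>
    if last < (T.length : Int) - k then
      let np0 := if notP ≥ (T.length : Int) then (T.length : Int) - 1 else notP
      let p := covidInner T last np0 ((np0 - last).toNat + 1)
      if p = last then -1
      else covidLoop T k p (p + 2 * k - 1) (counter + 1) fuel
    else counter


def covid (T : List Int) (k : Int) : Int :=
  covidLoop T k (-1) (-1 + k) 0 (T.length + 1)

-- ===== PORT B =====
-- `while j < len(ones) and ones[j] <= b: j += 1`; fuel ones.length + 1 never runs out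
def covidAdvance (ones : List Int) (b : Int) (j fuel : Nat) : Nat :=
  match fuel with
  | 0 => j
  | fuel + 1 =>
    if h : j < ones.length then
      if ones[j] ≤ b then covidAdvance ones b (j + 1) fuel else j
    else j

-- the outer `while uncovered < n` loop of B; fuel T.length + 1 never runs out (B is total)
def covidAltLoop (ones : List Int) (n k count prev uncovered : Int) (j : Nat) (fuel : Nat) : Int :=
  match fuel with
  | 0 => count
  | fuel + 1 =>
    if prev + k < n then
      let j' := covidAdvance ones (uncovered + k - 1) j (ones.length + 1)
      if j' = 0 ∨ ones.getD (j' - 1) 0 ≤ prev then -1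
      else
        let p := ones.getD (j' - 1) 0
        covidAltLoop ones n k (count + 1) p (p + k) j' fuel
    else count

def covid_alt (T : List Int) (k : Int) : Int :=
  let ones := ((PySem.List.enumerate T 0).filter (fun p => p.2 == 1)).map (fun p => p.1)
  covidAltLoop ones (T.length : Int) k 0 (-1) 0 0 (T.length + 1)

-- ===== PRECONDITION & SPEC =====
-- Pre_covid excludes exactly the inputs where A raises IndexError: every k < 0
-- (A's candidate index walks off the left end of T), and k = 0 on empty T.
def Pre_covid (T : List Int) (k : Int) : Prop := 1 ≤ k ∨ (k = 0 ∧ T ≠ [])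
instance (T : List Int) (k : Int) : Decidable (Pre_covid T k) := by unfold Pre_covid; infer_instance

def pvWitness_covid : List Int × Int := ([1, 0, 1], 2)

def Spec_covid (T : List Int) (k : Int) (out : Int) : Prop := out = covid_alt T k
instance (T : List Int) (k : Int) (out : Int) : Decidable (Spec_covid T k out) := by unfold Spec_covid; infer_instance

-- ===== CLAIM (what is proved, stated in full; the proofs are below) =====
def Claim_equal_covid : Prop := ∀ (T : List Int) (k : Int), Dom_covid T k → Pre_covid T k → Spec_covid T k (covid T k)

-- ===== LEMMAS AND PROOFS =====

def onesOf (T : List Int) : List Int :=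
  ((PySem.List.enumerate T 0).filter (fun p => p.2 == 1)).map (fun p => p.1)

lemma mem_onesOf {T : List Int} {o : Int} :
    o ∈ onesOf T ↔ ∃ (i : Nat) (h : i < T.length), o = (i : Int) ∧ T[i] = 1 := by
  unfold onesOf
  simp [List.mem_map, List.mem_filter, PySem.List.mem_enumerate_iff]

lemma pairwise_onesOf (T : List Int) : (onesOf T).Pairwise (· < ·) := by
  unfold onesOf
  exact List.Pairwise.map _ (fun a b h => h)
    (List.Pairwise.filter _ (PySem.List.pairwise_lt_enumerate T 0))

lemma onesOf_mono {T : List Int} {i j : Nat} (hj : j < (onesOf T).length) (hij : i < j) :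
    (onesOf T)[i]'(Nat.lt_trans hij hj) < (onesOf T)[j] :=
  List.pairwise_iff_getElem.mp (pairwise_onesOf T) i j _ hj hij

lemma onesOf_is_one {T : List Int} {i : Nat} (hi : i < (onesOf T).length) :
    0 ≤ (onesOf T)[i] ∧ (onesOf T)[i] < (T.length : Int) ∧
      ∃ h : ((onesOf T)[i]).toNat < T.length, T[((onesOf T)[i]).toNat] = 1 := by
  have hm := mem_onesOf.mp (List.getElem_mem hi)
  obtain ⟨m, hml, he, h1⟩ := hm
  refine ⟨by omega, by omega, ?_⟩
  have : ((onesOf T)[i]).toNat = m := by omega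
  rw [this]
  exact ⟨hml, h1⟩

lemma onesOf_complete {T : List Int} {o : Int} (h0 : 0 ≤ o) (hn : o.toNat < T.length)
    (h1 : T[o.toNat] = 1) : ∃ (i : Nat) (hi : i < (onesOf T).length), (onesOf T)[i] = o := by
  have hm : o ∈ onesOf T := mem_onesOf.mpr ⟨o.toNat, hn, by omega, h1⟩
  obtain ⟨i, hi, he⟩ := List.mem_iff_getElem.mp hm
  exact ⟨i, hi, he⟩

lemma inner_good (T : List Int) (hT : T ≠ []) :
    ∀ (fuel : Nat) (np last : Int), -1 ≤ last → last ≤ np → np < (T.length : Int) →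
      (np - last).toNat + 1 ≤ fuel →
      last ≤ covidInner T last np fuel ∧ covidInner T last np fuel ≤ np ∧
      (covidInner T last np fuel ≠ last → 0 ≤ covidInner T last np fuel ∧
        ∃ h : (covidInner T last np fuel).toNat < T.length, T[(covidInner T last np fuel).toNat] = 1) ∧
      (∀ (o : Nat), covidInner T last np fuel < (o : Int) → (o : Int) ≤ np →
        ∀ h : o < T.length, T[o] ≠ 1) := by
  intro fuel
  induction fuel with
  | zero => intro np last _ _ _ hf; omega
  | succ f ih =>
    intro np last hl hln hnn hf
    have hTl : 0 < T.length := List.length_pos_iff.mpr hT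
    have hv : ∃ v, PySem.List.pyGet? T np = some v := by
      rcases lt_or_ge np 0 with hneg | hpos
      · have hnp : np = -1 := by omega
        subst hnp
        rw [PySem.List.pyGet?_neg_one]
        exact Option.isSome_iff_exists.mp (List.getLast?_isSome.mpr hT)
      · exact ⟨T[np.toNat], PySem.List.pyGet?_eq_some_getElem T hpos (by omega)⟩
    obtain ⟨v, hvv⟩ := hv
    simp only [covidInner, hvv]
    by_cases hc : v ≠ 1 ∧ last + 1 ≤ np
    · simp only [if_pos hc]
      have hrec := ih (np - 1) last hl (by omega) (by omega) (by omega)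
      obtain ⟨r1, r2, r3, r4⟩ := hrec
      refine ⟨r1, by omega, r3, ?_⟩
      intro o ho1 ho2 h
      by_cases hon : (o : Int) = np
      · have h0np : 0 ≤ np := by omega
        have : T[np.toNat] = v := by
          have := PySem.List.pyGet?_eq_some_getElem T h0np (by omega)
          rw [hvv] at this; exact (Option.some_inj.mp this).symm
        have hotn : o = np.toNat := by omega
        subst hotn
        rw [this]
        exact hc.1
      · exact r4 o ho1 (by omega) h
    · simp only [if_neg hc]
      refine ⟨hln, le_refl _, ?_, by intro o h1 h2 _; omega⟩
      intro hne
      have hnp1 : last + 1 ≤ np := by omega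
      have hv1 : v = 1 := by tauto
      have h0np : 0 ≤ np := by omega
      have hget : T[np.toNat] = v := by
        have := PySem.List.pyGet?_eq_some_getElem T h0np (by omega)
        rw [hvv] at this; exact (Option.some_inj.mp this).symm
      exact ⟨by omega, by omega, by rw [hget, hv1]⟩

lemma adv_spec (ones : List Int) (b : Int) :
    ∀ (fuel j : Nat), j ≤ ones.length → ones.length - j < fuel →
      j ≤ covidAdvance ones b j fuel ∧ covidAdvance ones b j fuel ≤ ones.length ∧
      (∀ i (hi : i < ones.length), j ≤ i → i < covidAdvance ones b j fuel → ones[i] ≤ b) ∧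
      (∀ h : covidAdvance ones b j fuel < ones.length, b < ones[covidAdvance ones b j fuel]) := by
  intro fuel
  induction fuel with
  | zero => intro j hj hf; omega
  | succ f ih =>
    intro j hj hf
    simp only [covidAdvance]
    by_cases h : j < ones.length
    · simp only [dif_pos h]
      by_cases hb : ones[j] ≤ b
      · simp only [if_pos hb]
        have hrec := ih (j + 1) (by omega) (by omega)
        obtain ⟨r1, r2, r3, r4⟩ := hrec
        refine ⟨by omega, r2, ?_, r4⟩
        intro i hi hji hlt
        by_cases hij : i = j
        · subst hij; exact hb
        · exact r3 i hi (by omega) hlt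
      · simp only [if_neg hb]
        refine ⟨le_refl _, by omega, by intro i hi h1 h2; omega, by intro _; omega⟩
    · simp only [dif_neg h]
      refine ⟨le_refl _, by omega, by intro i hi h1 h2; omega, by intro hh; omega⟩

lemma eqloop (T : List Int) (k : Int) (hT : T ≠ []) (hk : 1 ≤ k) :
    ∀ (fuel : Nat) (last u counter : Int) (j : Nat),
      -1 ≤ last → last < u → 0 ≤ u → u ≤ last + k →
      j ≤ (onesOf T).length →
      (∀ i (hi : i < (onesOf T).length), i < j → (onesOf T)[i] ≤ u + k - 1) →
      (T.length : Int) - last ≤ (fuel : Int) →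
      covidLoop T k last (u + k - 1) counter fuel =
        covidAltLoop (onesOf T) (T.length : Int) k counter last u j fuel := by
  intro fuel
  induction fuel with
  | zero => intro last u counter j _ _ _ _ _ _ _; rfl
  | succ f ih =>
    intro last u counter j hl hlu hu0 hulk hjlen hinv hfuel
    have hTl : 0 < T.length := List.length_pos_iff.mpr hT
    simp only [covidLoop, covidAltLoop]
    by_cases hlastn : last < (T.length : Int) - k
    · rw [if_pos hlastn, if_pos (show last + k < (T.length : Int) by omega)]
      -- abbreviations
      set n : Int := (T.length : Int) with hn
      set bound : Int := u + k - 1 with hbound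
      set np0 : Int := if bound ≥ n then n - 1 else bound with hnp0
      have hnp0a : last + 1 ≤ np0 := by
        rw [hnp0]; split <;> omega
      have hnp0b : np0 < n := by rw [hnp0]; split <;> omega
      have hnp0c : np0 ≤ bound := by rw [hnp0]; split <;> omega
      set p := covidInner T last np0 ((np0 - last).toNat + 1) with hp
      have Hp := inner_good T hT ((np0 - last).toNat + 1) np0 last (by omega) (by omega) hnp0b (by omega)
      obtain ⟨P1, P2, P3, P4⟩ := Hp
      set j' := covidAdvance (onesOf T) bound j ((onesOf T).length + 1) with hj'
      have Hj := adv_spec (onesOf T) bound ((onesOf T).length + 1) j hjlen (by omega)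
      obtain ⟨A1, A2, A3, A4⟩ := Hj
      -- all indices below j' are ≤ bound
      have Hall : ∀ i (hi : i < (onesOf T).length), i < j' → (onesOf T)[i] ≤ bound := by
        intro i hi hij'
        by_cases hcase : i < j
        · exact le_trans (hinv i hi hcase) (le_refl _)
        · exact A3 i hi (by omega) hij'
      -- all indices ≥ j' are > bound
      have Habove : ∀ i (hi : i < (onesOf T).length), j' ≤ i → bound < (onesOf T)[i] := by
        intro i hi hge
        have hj'len : j' < (onesOf T).length := by omega
        by_cases he : i = j'
        · subst he; exact A4 hi
        · exact lt_trans (A4 hj'len) (onesOf_mono hi (by omega))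
      by_cases hpl : p = last
      · -- A returns -1; show B's guard holds
        rw [if_pos hpl]
        have hguard : j' = 0 ∨ (onesOf T).getD (j' - 1) 0 ≤ last := by
          by_cases hj0 : j' = 0
          · exact Or.inl hj0
          · right
            have hj1 : j' - 1 < (onesOf T).length := by omega
            rw [List.getD_eq_getElem (onesOf T) 0 hj1]
            set q := (onesOf T)[j' - 1]'hj1 with hq
            have hqb : q ≤ bound := Hall _ hj1 (by omega)
            have hqone := onesOf_is_one hj1
            obtain ⟨hq0, hqn, hqlt, hq1⟩ := hqone
            by_contra hql
            push_neg at hql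
            -- q is a 1-position in (last, np0]: contradicts maximality of p = last
            have hqnp0 : q ≤ np0 := by rw [hnp0]; split <;> omega
            exact P4 q.toNat (by omega) (by omega) hqlt hq1
        rw [if_pos hguard]
      · -- A places a machine at p; show B picks the same position
        rw [if_neg hpl]
        obtain ⟨hp0, hptn, hp1⟩ := P3 hpl
        have hpnp0 : p ≤ np0 := P2
        have hpb : p ≤ bound := le_trans hpnp0 hnp0c
        obtain ⟨i0, hi0, hie⟩ := onesOf_complete hp0 hptn hp1
        have hi0j' : i0 < j' := by
          by_contra hcon
          push_neg at hcon
          have := Habove i0 hi0 hcon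
          omega
        have hj0 : j' ≠ 0 := by omega
        have hj1 : j' - 1 < (onesOf T).length := by omega
        have hgetd : (onesOf T).getD (j' - 1) 0 = (onesOf T)[j' - 1]'hj1 := List.getD_eq_getElem (onesOf T) 0 hj1
        set q := (onesOf T)[j' - 1]'hj1 with hq
        have hpq : p ≤ q := by
          by_cases he : i0 = j' - 1
          · subst he; omega
          · have := onesOf_mono (T := T) hj1 (i := i0) (by omega)
            omega
        have hqb : q ≤ bound := Hall _ hj1 (by omega)
        have hqone := onesOf_is_one (T := T) hj1
        obtain ⟨hq0, hqn, hqlt, hq1⟩ := hqone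
        have hqnp0 : q ≤ np0 := by rw [hnp0]; split <;> omega
        have hqp : q = p := by
          by_contra hne
          exact P4 q.toNat (by omega) (by omega) hqlt hq1
        have hguard : ¬ (j' = 0 ∨ (onesOf T).getD (j' - 1) 0 ≤ last) := by
          push_neg
          refine ⟨hj0, ?_⟩
          rw [hgetd, hqp]
          omega
        rw [if_neg hguard]
        rw [hgetd, hqp]
        have harg : p + 2 * k - 1 = (p + k) + k - 1 := by ring
        rw [harg]
        exact ih p (p + k) (counter + 1) j' (by omega) (by omega) (by omega) (by omega)
          (by omega)
          (by intro i hi hij'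
              have := Hall i hi hij'
              omega)
          (by omega)
    · rw [if_neg hlastn, if_neg (show ¬ (last + k < (T.length : Int)) by omega)]

lemma covid_alt_eq (T : List Int) (k : Int) :
    covid_alt T k = covidAltLoop (onesOf T) (T.length : Int) k 0 (-1) 0 0 (T.length + 1) := rfl

lemma covid_nil (k : Int) (hk : 1 ≤ k) : covid [] k = covid_alt [] k := by
  have h1 : ¬ ((-1 : Int) < (([] : List Int).length : Int) - k) := by simp; omega
  have h2 : ¬ ((-1 : Int) + k < (([] : List Int).length : Int)) := by simp; omega
  rw [covid, covid_alt]
  show covidLoop [] k (-1) (-1 + k) 0 (0 + 1) = covidAltLoop _ _ k 0 (-1) 0 0 (0 + 1)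
  rw [covidLoop, covidAltLoop]
  rw [if_neg h1, if_neg h2]

lemma covid_k0 (T : List Int) (hT : T ≠ []) : covid T 0 = covid_alt T 0 := by
  have hTl : 0 < T.length := List.length_pos_iff.mpr hT
  obtain ⟨v, hv⟩ : ∃ v, PySem.List.pyGet? T (-1) = some v := by
    rw [PySem.List.pyGet?_neg_one]
    exact Option.isSome_iff_exists.mp (List.getLast?_isSome.mpr hT)
  have hinner : covidInner T (-1) (-1) 1 = -1 := by
    simp only [covidInner, hv]
    rw [if_neg (by intro hcon; omega)]
  have hadv : covidAdvance (onesOf T) (-1) 0 ((onesOf T).length + 1) = 0 := by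
    rw [covidAdvance]
    by_cases h : 0 < (onesOf T).length
    · rw [dif_pos h]
      have := (onesOf_is_one h).1
      rw [if_neg (by omega)]
    · rw [dif_neg h]
  have c1 : (-1 : Int) < (T.length : Int) - 0 := by omega
  have c2 : (-1 : Int) < (T.length : Int) := by omega
  have c3 : ¬ ((-1 : Int) ≥ (T.length : Int)) := by omega
  rw [covid, covid_alt_eq]
  simp only [covidLoop, covidAltLoop, c1, c2, c3, if_false, true_or, if_pos, add_zero,
    zero_add, sub_self, Int.toNat_zero, zero_sub, hinner, hadv]

lemma covid_main (T : List Int) (k : Int) (hpre : 1 ≤ k ∨ (k = 0 ∧ T ≠ [])) :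
    covid T k = covid_alt T k := by
  by_cases hT : T = []
  · subst hT
    have hk : 1 ≤ k := by
      rcases hpre with h | ⟨_, h⟩
      · exact h
      · exact absurd rfl h
    exact covid_nil k hk
  · rcases hpre with hk | ⟨hk0, _⟩
    · have hTl : 0 < T.length := List.length_pos_iff.mpr hT
      have heq := eqloop T k hT hk (T.length + 1) (-1) 0 0 0
        (le_refl _) (by omega) (le_refl _) (by omega)
        (Nat.zero_le _) (by intro i hi hcon; omega)
        (by push_cast; omega)
      have harg : (-1 : Int) + k = 0 + k - 1 := by ring
      rw [covid, harg, covid_alt_eq]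
      exact heq
    · subst hk0
      exact covid_k0 T hT

-- ===== VERDICT (by name: the statements are the Claim_ definitions above) =====
theorem covid_spec : Claim_equal_covid := by
  intro T k _ hpre
  unfold Spec_covid
  exact covid_main T k hpre
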